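-- pv_equiv track=rewrite | github.com/AxiomOrient/composable-skills | skills/compose/scripts/parse_macro.py | expand_workflow_skills
-- ===== SOURCE A (Python) =====
-- from typing import Dict, List, Optional, Set, Tuple
--
-- PER_SKILL_META_FILE = "skill.json"
--
-- def expand_workflow_skills(skills: List[str], workflow_registry: Dict[str, dict]) -> Tuple[List[str], List[str]]:
--     warnings: List[str] = []
--     expanded: List[str] = []
--     expansion_cache: Dict[str, List[str]] = {}
--
--     def expand_one(skill: str, stack: List[str]) -> List[str]:
--         if skill not in workflow_registry:
--             if skill.startswith("workflow-"):
--                 raise ValueError(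
--                     f"Workflow metadata missing for `${skill}`. Add `skills/{skill}/{PER_SKILL_META_FILE}` so workflow expansion can run."
--                 )
--             return [skill]
--         if skill in expansion_cache:
--             return list(expansion_cache[skill])
--         if skill in stack:
--             cycle = " -> ".join(stack + [skill])
--             raise ValueError(f"Workflow cycle detected: {cycle}")
--
--         entry = workflow_registry[skill]
--         stack.append(skill)
--         flattened: List[str] = []
--         for raw in entry.get("expands_to", []):
--             target = raw[1:] if isinstance(raw, str) and raw.startswith("$") else raw
--             if not isinstance(target, str) or not target:
--                 raise ValueError(f"Workflow `{skill}` has invalid expands_to token: {raw}")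
--             flattened.extend(expand_one(target, stack))
--         stack.pop()
--         expansion_cache[skill] = list(flattened)
--         warnings.append(
--             f"Expanded workflow `${skill}` -> " + " + ".join(f"${name}" for name in flattened)
--         )
--         return list(flattened)
--
--     for skill in skills:
--         expanded.extend(expand_one(skill, []))
--     return expanded, warnings
-- ===== SOURCE B (Python) =====
-- from typing import Dict, List, Tuple
--
-- PER_SKILL_META_FILE = "skill.json"
--
-- def expand_workflow_skills(skills: List[str], workflow_registry: Dict[str, dict]) -> Tuple[List[str], List[str]]:
--     """Iterative explicit-stack DFS replacing the recursive expand_one.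
--
--     Work items: ("skill", sk) a skill ready to expand, ("tok", parent, raw) a raw
--     expands_to token still to validate, ("close", sk) the completion marker of an
--     opened workflow node.  `path` is the chain of currently open nodes (cycle
--     check), `accs` a stack of partial flattened lists, one per open node plus the
--     bottom-level accumulator.
--     """
--     warnings: List[str] = []
--     expanded: List[str] = []
--     expansion_cache: Dict[str, List[str]] = {}
--
--     for top in skills:
--         work = [("skill", top)]
--         path: List[str] = []
--         accs: List[List[str]] = [[]]
--         while work:
--             item = work.pop()
--             if item[0] == "tok":
--                 _, parent, raw = item
--                 target = raw[1:] if isinstance(raw, str) and raw.startswith("$") else raw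
--                 if not isinstance(target, str) or not target:
--                     raise ValueError(f"Workflow `{parent}` has invalid expands_to token: {raw}")
--                 item = ("skill", target)
--             if item[0] == "skill":
--                 sk = item[1]
--                 if sk not in workflow_registry:
--                     if sk.startswith("workflow-"):
--                         raise ValueError(
--                             f"Workflow metadata missing for `${sk}`. Add `skills/{sk}/{PER_SKILL_META_FILE}` so workflow expansion can run."
--                         )
--                     accs[-1].append(sk)
--                 elif sk in expansion_cache:
--                     accs[-1].extend(expansion_cache[sk])
--                 elif sk in path:
--                     cycle = " -> ".join(path + [sk])
--                     raise ValueError(f"Workflow cycle detected: {cycle}")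
--                 else:
--                     path.append(sk)
--                     work.append(("close", sk))
--                     for raw in reversed(workflow_registry[sk].get("expands_to", [])):
--                         work.append(("tok", sk, raw))
--                     accs.append([])
--             else:  # close
--                 sk = item[1]
--                 flat = accs.pop()
--                 path.pop()
--                 expansion_cache[sk] = flat
--                 warnings.append(
--                     f"Expanded workflow `${sk}` -> " + " + ".join(f"${name}" for name in flat)
--                 )
--                 accs[-1].extend(flat)
--         expanded.extend(accs[0])
--     return expanded, warnings
-- ===== Notes on version B (the rewrite author's own statement) =====
-- stated objective: alternative
-- what changed: The recursive expand_one closure (implicit call stack, mutable cache/warnings) is replaced by a single iterative explicit-stack DFS: one while-loop over a worklist of tok/skill/close items with an explicit path and a stack of partial accumulators, preserving post-order flattening, warn-once-on-first-expansion, and all raise points.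
import Mathlib
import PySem

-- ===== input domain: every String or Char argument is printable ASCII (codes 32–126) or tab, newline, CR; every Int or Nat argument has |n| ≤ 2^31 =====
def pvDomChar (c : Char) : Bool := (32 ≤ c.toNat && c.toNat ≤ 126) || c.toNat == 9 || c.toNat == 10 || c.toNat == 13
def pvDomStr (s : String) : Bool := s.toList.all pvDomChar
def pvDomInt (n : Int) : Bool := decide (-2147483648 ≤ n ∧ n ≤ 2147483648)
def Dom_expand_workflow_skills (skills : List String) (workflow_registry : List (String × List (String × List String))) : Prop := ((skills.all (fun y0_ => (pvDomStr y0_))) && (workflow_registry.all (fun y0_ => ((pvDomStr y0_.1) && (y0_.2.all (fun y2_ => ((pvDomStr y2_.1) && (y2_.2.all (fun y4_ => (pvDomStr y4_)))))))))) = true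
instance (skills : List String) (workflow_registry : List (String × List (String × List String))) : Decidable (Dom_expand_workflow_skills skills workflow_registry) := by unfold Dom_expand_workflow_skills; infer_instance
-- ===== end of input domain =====

-- B replaces A's recursive `expand_one` by an explicit-stack iterative DFS (one worklist loop
-- with tok/skill/close items); objective: alternative decomposition, same cost.
-- All ValueError raises of A are mapped to `none` in the cores (exact raise messages are never
-- returned); `Pre_` excludes exactly the raising inputs. Shared string helpers:

def pvStrip (raw : String) : String :=
  if PySem.Str.startswith raw "$" then PySem.Str.slice raw (some 1) none else raw

def pvIsWf (sk : String) : Bool := PySem.Str.startswith sk "workflow-"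

def pvEntryGet (reg : List (String × List (String × List String))) (sk : String) :
    Option (List (String × List String)) :=
  PySem.Dict.get? (PySem.Dict.mk reg) sk

def pvTokens (entry : List (String × List String)) : List String :=
  PySem.Dict.getD (PySem.Dict.mk entry) "expands_to" []

def pvWarn (sk : String) (flat : List String) : String :=
  "Expanded workflow `$" ++ sk ++ "` -> " ++ PySem.Str.join " + " (flat.map (fun name => "$" ++ name))

-- ===== PORT A =====
-- `expand_one` and its inner for-loop over `expands_to` (`pvExpandList`, threading
-- (flattened, cache, warnings) exactly as A mutates them).  `fuel` is a pure termination
-- device: it is consulted only when opening a registry node, and the value reg.length + 1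
-- used below can never be exhausted (the stack holds distinct registry keys).
mutual
def pvExpandOne (reg : List (String × List (String × List String))) (fuel : Nat)
    (skill : String) (stack : List String) (cache : PySem.Dict String (List String))
    (warns : List String) :
    Option (List String × PySem.Dict String (List String) × List String) :=
  match pvEntryGet reg skill with
  | none =>
    if pvIsWf skill then none   -- raise: workflow metadata missing
    else some ([skill], cache, warns)
  | some entry =>
    match PySem.Dict.get? cache skill with
    | some v => some (v, cache, warns)
    | none =>
      if skill ∈ stack then none   -- raise: workflow cycle detected
      else
        match fuel with
        | 0 => none   -- unreachable with the fuel chosen below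
        | fuel' + 1 =>
          match pvExpandList reg fuel' (pvTokens entry) skill (stack ++ [skill])
              cache warns [] with
          | none => none
          | some (flat, c, w) =>
            some (flat, PySem.Dict.insert c skill flat, w ++ [pvWarn skill flat])
  termination_by (fuel, 0)

def pvExpandList (reg : List (String × List (String × List String))) (fuel : Nat)
    (raws : List String) (skill : String) (stack : List String)
    (cache : PySem.Dict String (List String)) (warns : List String)
    (flattened : List String) :
    Option (List String × PySem.Dict String (List String) × List String) :=
  match raws with
  | [] => some (flattened, cache, warns)
  | raw :: rest =>
    let target := pvStrip raw
    if target = "" then none   -- raise ValueError: invalid expands_to token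
    else
      match pvExpandOne reg fuel target stack cache warns with
      | none => none
      | some (f, c, w) => pvExpandList reg fuel rest skill stack c w (flattened ++ f)
  termination_by (fuel, raws.length + 1)
end

-- the top-level `for skill in skills` loop
def pvExpandTop (reg : List (String × List (String × List String))) (skills : List String)
    (cache : PySem.Dict String (List String)) (warns : List String)
    (expanded : List String) : Option (List String × List String) :=
  match skills with
  | [] => some (expanded, warns)
  | sk :: rest =>
    match pvExpandOne reg (reg.length + 1) sk [] cache warns with
    | none => none
    | some (f, c, w) => pvExpandTop reg rest c w (expanded ++ f)

def expand_workflow_skills (skills : List String)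
    (workflow_registry : List (String × List (String × List String))) :
    List String × List String :=
  (pvExpandTop workflow_registry skills (PySem.Dict.mk []) [] []).getD ([], [])

-- ===== PORT B =====
-- Work items of the explicit-stack DFS.  The Nat in `close` is the termination fuel to restore
-- when the node completes; it never influences any computed value (Source B needs no fuel at all).
inductive PvItem where
  | skill (sk : String)
  | tok (parent raw : String)
  | close (sk : String) (restore : Nat)
deriving DecidableEq, Repr

-- accs[-1].extend(v):  accs is kept top-first (head = innermost open node)
def pvAppendTop (accs : List (List String)) (v : List String) : List (List String) :=
  match accs with
  | a :: r => (a ++ v) :: r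
  | [] => []

-- termination potential for the worklist machine: a pending skill/tok item at fuel f weighs
-- (T+2)^f, a close marker weighs 1 and restores its stored fuel for the items after it
def pvMeasure (T : Nat) : Nat → List PvItem → Nat
  | _, [] => 0
  | _, PvItem.close _ r :: rest => 1 + pvMeasure T r rest
  | f, _ :: rest => (T + 2) ^ f + pvMeasure T f rest

def pvMaxTok (reg : List (String × List (String × List String))) : Nat :=
  (reg.map (fun p => (pvTokens p.2).length)).sum

theorem pvMeasure_toks (T f : Nat) (sk : String) (xs : List String) (rest : List PvItem) :
    pvMeasure T f (xs.map (PvItem.tok sk) ++ rest)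
      = xs.length * (T + 2) ^ f + pvMeasure T f rest := by
  induction xs with
  | nil => simp
  | cons x xs ih => simp [pvMeasure, ih]; ring

theorem pvTokens_le_maxTok (reg : List (String × List (String × List String)))
    (sk : String) (entry : List (String × List String))
    (h : pvEntryGet reg sk = some entry) : (pvTokens entry).length ≤ pvMaxTok reg := by
  have hm : (sk, entry) ∈ (PySem.Dict.mk reg).items :=
    PySem.Dict.mem_items_of_get?_eq_some (h := h)
  have hm' : (sk, entry) ∈ reg := hm
  have : (pvTokens entry).length ∈ reg.map (fun p => (pvTokens p.2).length) :=
    List.mem_map.mpr ⟨(sk, entry), hm', rfl⟩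
  exact List.le_sum_of_mem this

-- the while-work loop of Source B (`pvRun`) with the shared skill-handling code (`pvStep`:
-- in Source B a tok item is validated and then reassigned as a skill item, so skill and tok
-- share this block); `path` is kept top-first (only membership and pop-top are used)
mutual
def pvRun (reg : List (String × List (String × List String))) (fuel : Nat)
    (work : List PvItem) (path : List String) (accs : List (List String))
    (cache : PySem.Dict String (List String)) (warns : List String) :
    Option (List (List String) × PySem.Dict String (List String) × List String) :=
  match work with
  | [] => some (accs, cache, warns)
  | PvItem.close sk restore :: rest =>
    match accs, path with
    | flat :: accs', _ :: path' =>
      pvRun reg restore rest path' (pvAppendTop accs' flat)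
        (PySem.Dict.insert cache sk flat) (warns ++ [pvWarn sk flat])
    | _, _ => none   -- unreachable: an open node always has its acc and path entry
  | PvItem.skill sk :: rest => pvStep reg fuel sk rest path accs cache warns
  | PvItem.tok _parent raw :: rest =>
    let target := pvStrip raw
    if target = "" then none   -- raise ValueError: invalid expands_to token
    else pvStep reg fuel target rest path accs cache warns
  termination_by ((pvMeasure (pvMaxTok reg) fuel work, 1) : Nat × Nat)
  decreasing_by
  all_goals simp [Prod.lex_def, pvMeasure]

def pvStep (reg : List (String × List (String × List String))) (fuel : Nat)
    (sk : String) (rest : List PvItem) (path : List String) (accs : List (List String))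
    (cache : PySem.Dict String (List String)) (warns : List String) :
    Option (List (List String) × PySem.Dict String (List String) × List String) :=
  match hentry : pvEntryGet reg sk with
  | none =>
    if pvIsWf sk then none   -- raise: workflow metadata missing
    else pvRun reg fuel rest path (pvAppendTop accs [sk]) cache warns
  | some entry =>
    match PySem.Dict.get? cache sk with
    | some v => pvRun reg fuel rest path (pvAppendTop accs v) cache warns
    | none =>
      if sk ∈ path then none   -- raise: workflow cycle detected
      else
        match fuel with
        | 0 => none   -- unreachable with the fuel chosen below
        | fuel' + 1 =>
          pvRun reg fuel'
            ((pvTokens entry).map (PvItem.tok sk) ++ PvItem.close sk (fuel' + 1) :: rest)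
            (sk :: path) ([] :: accs) cache warns
  termination_by (((pvMaxTok reg + 2) ^ fuel + pvMeasure (pvMaxTok reg) fuel rest, 0) : Nat × Nat)
  decreasing_by
  · simp [Prod.lex_def]
  · simp [Prod.lex_def]
  · simp [Prod.lex_def, pvMeasure, pvMeasure_toks]
    have hk := pvTokens_le_maxTok reg sk entry hentry
    have h1 : 1 ≤ (pvMaxTok reg + 2) ^ fuel' := Nat.one_le_pow _ _ (by omega)
    have h2 : (pvMaxTok reg + 2) ^ (fuel' + 1)
        = pvMaxTok reg * (pvMaxTok reg + 2) ^ fuel' + 2 * (pvMaxTok reg + 2) ^ fuel' := by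
      ring
    have h3 : (pvTokens entry).length * (pvMaxTok reg + 2) ^ fuel'
        ≤ pvMaxTok reg * (pvMaxTok reg + 2) ^ fuel' :=
      Nat.mul_le_mul_right _ hk
    omega
end

-- the top-level loop: run the machine once per requested skill;
-- `expanded.extend(accs[0])`: the machine ends with the single bottom accumulator
def pvRunTop (reg : List (String × List (String × List String))) (skills : List String)
    (cache : PySem.Dict String (List String)) (warns : List String)
    (expanded : List String) : Option (List String × List String) :=
  match skills with
  | [] => some (expanded, warns)
  | top :: rest =>
    match pvRun reg (reg.length + 1) [PvItem.skill top] [] [[]] cache warns with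
    | none => none
    | some (accs, c, w) => pvRunTop reg rest c w (expanded ++ accs.headD [])

def expand_workflow_skills_alt (skills : List String)
    (workflow_registry : List (String × List (String × List String))) :
    List String × List String :=
  (pvRunTop workflow_registry skills (PySem.Dict.mk []) [] []).getD ([], [])

-- ===== PRECONDITION & SPEC =====
-- graph view of the registry, used only by Pre_
def pvKeys (reg : List (String × List (String × List String))) : List String := reg.map (·.1)

def pvTokensOf (reg : List (String × List (String × List String))) (k : String) : List String :=
  match pvEntryGet reg k with
  | some e => pvTokens e
  | none => []

def pvChildren (reg : List (String × List (String × List String))) (k : String) : List String :=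
  (pvTokensOf reg k).map pvStrip

def pvReachStep (reg : List (String × List (String × List String))) (S : List String) :
    List String :=
  PySem.List.dedup
    (S ++ (S.filter (fun x => decide (x ∈ pvKeys reg))).flatMap (pvChildren reg))

def pvReach (reg : List (String × List (String × List String))) (S0 : List String) :
    List String :=
  (pvReachStep reg)^[S0.length + (reg.map (fun p => (pvTokens p.2).length)).sum + 1]
    (PySem.List.dedup S0)

-- Pre_ holds exactly when Python A returns normally: along the registry nodes reachable from
-- `skills`, no missing `workflow-` metadata, no empty expands_to target, and no cycle.
-- (The proof below in fact shows the two ports agree on ALL inputs — both map every raise to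
-- the same default — so the Pre_ hypothesis is not needed by the proof; it documents where A
-- returns a value.)
def Pre_expand_workflow_skills (skills : List String)
    (workflow_registry : List (String × List (String × List String))) : Prop :=
  (∀ x ∈ pvReach workflow_registry skills,
      x ∉ pvKeys workflow_registry → ¬ (pvIsWf x = true)) ∧
  (∀ k ∈ pvReach workflow_registry skills, k ∈ pvKeys workflow_registry →
      (∀ raw ∈ pvTokensOf workflow_registry k, pvStrip raw ≠ "") ∧
      k ∉ pvReach workflow_registry (pvChildren workflow_registry k))

instance (skills : List String) (workflow_registry : List (String × List (String × List String))) : Decidable (Pre_expand_workflow_skills skills workflow_registry) := by unfold Pre_expand_workflow_skills; infer_instance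

def pvWitness_expand_workflow_skills :
    List String × (List (String × List (String × List String))) :=
  (["workflow-a", "b"], [("workflow-a", [("expands_to", ["$x", "y"])])])

def Spec_expand_workflow_skills (skills : List String) (workflow_registry : List (String × List (String × List String))) (out : List String × List String) : Prop := out = expand_workflow_skills_alt skills workflow_registry
instance (skills : List String) (workflow_registry : List (String × List (String × List String))) (out : List String × List String) : Decidable (Spec_expand_workflow_skills skills workflow_registry out) := by unfold Spec_expand_workflow_skills; infer_instance

-- ===== CLAIM (what is proved, stated in full; the proofs are below) =====
def Claim_equal_expand_workflow_skills : Prop := ∀ (skills : List String) (workflow_registry : List (String × List (String × List String))), Dom_expand_workflow_skills skills workflow_registry → Pre_expand_workflow_skills skills workflow_registry → Spec_expand_workflow_skills skills workflow_registry (expand_workflow_skills skills workflow_registry)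

-- ===== LEMMAS AND PROOFS =====

-- simulation statement L1: one `skill` item behaves like one `expand_one` call
def PvL1 (reg : List (String × List (String × List String))) (fuel : Nat) : Prop :=
  ∀ (sk : String) (rest : List PvItem) (path : List String) (accs : List (List String))
    (cache : PySem.Dict String (List String)) (warns : List String),
    pvStep reg fuel sk rest path accs cache warns =
      match pvExpandOne reg fuel sk path.reverse cache warns with
      | none => none
      | some (f, c, w) => pvRun reg fuel rest path (pvAppendTop accs f) c w

-- simulation statement L2: a block of `tok` items behaves like the expand_list loop
def PvL2 (reg : List (String × List (String × List String))) (fuel : Nat) : Prop :=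
  ∀ (raws : List String) (parent : String) (rest : List PvItem) (path : List String)
    (acc : List String) (accs : List (List String))
    (cache : PySem.Dict String (List String)) (warns : List String),
    pvRun reg fuel (raws.map (PvItem.tok parent) ++ rest) path (acc :: accs) cache warns =
      match pvExpandList reg fuel raws parent path.reverse cache warns acc with
      | none => none
      | some (f, c, w) => pvRun reg fuel rest path (f :: accs) c w

theorem pvL2_of_L1 (reg : List (String × List (String × List String))) (fuel : Nat)
    (h1 : PvL1 reg fuel) : PvL2 reg fuel := by
  intro raws
  induction raws with
  | nil =>
    intro parent rest path acc accs cache warns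
    rw [pvExpandList]
    simp
  | cons raw raws' ih =>
    intro parent rest path acc accs cache warns
    rw [pvExpandList]
    simp only [List.map_cons, List.cons_append]
    rw [pvRun]
    by_cases hv : pvStrip raw = ""
    · simp [hv]
    · simp only [hv, if_false]
      rw [h1]
      cases hx : pvExpandOne reg fuel (pvStrip raw) path.reverse cache warns with
      | none => simp
      | some r =>
        obtain ⟨f, c, w⟩ := r
        simp only [pvAppendTop]
        rw [ih]

theorem pvL1_all (reg : List (String × List (String × List String))) :
    ∀ fuel, PvL1 reg fuel := by
  intro fuel
  induction fuel with
  | zero =>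
    intro sk rest path accs cache warns
    rw [pvStep, pvExpandOne]
    cases hentry : pvEntryGet reg sk with
    | none => by_cases hw : pvIsWf sk = true <;> simp [hw]
    | some entry =>
      cases hc : PySem.Dict.get? cache sk with
      | some v => simp [hc]
      | none =>
        by_cases hp : sk ∈ path
        · simp [hc, hp, List.mem_reverse]
        · simp [hc, hp, List.mem_reverse]
  | succ n ih =>
    intro sk rest path accs cache warns
    rw [pvStep, pvExpandOne]
    cases hentry : pvEntryGet reg sk with
    | none => by_cases hw : pvIsWf sk = true <;> simp [hw]
    | some entry =>
      cases hc : PySem.Dict.get? cache sk with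
      | some v => simp [hc]
      | none =>
        by_cases hp : sk ∈ path
        · simp [hc, hp, List.mem_reverse]
        · simp only [hc, hp, List.mem_reverse, if_false, decide_false]
          rw [pvL2_of_L1 reg n ih (pvTokens entry) sk (PvItem.close sk (n + 1) :: rest)
              (sk :: path) [] accs cache warns]
          simp only [List.reverse_cons]
          cases hx : pvExpandList reg n (pvTokens entry) sk (path.reverse ++ [sk])
              cache warns [] with
          | none => simp
          | some r =>
            obtain ⟨flat, c, w⟩ := r
            simp only [hx]
            rw [pvRun.eq_def]

theorem pvTop_eq (reg : List (String × List (String × List String))) :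
    ∀ (skills : List String) (cache : PySem.Dict String (List String))
      (warns : List String) (expanded : List String),
      pvRunTop reg skills cache warns expanded = pvExpandTop reg skills cache warns expanded := by
  intro skills
  induction skills with
  | nil => intro cache warns expanded; rw [pvRunTop, pvExpandTop]
  | cons top rest ih =>
    intro cache warns expanded
    rw [pvRunTop, pvExpandTop]
    rw [pvRun.eq_def]
    simp only []
    rw [pvL1_all reg (reg.length + 1) top [] [] [[]] cache warns]
    simp only [List.reverse_nil]
    cases hx : pvExpandOne reg (reg.length + 1) top [] cache warns with
    | none => simp
    | some r =>
      obtain ⟨f, c, w⟩ := r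
      simp only []
      rw [pvRun.eq_def]
      simp [pvAppendTop, ih]

theorem pv_ports_eq (skills : List String)
    (workflow_registry : List (String × List (String × List String))) :
    expand_workflow_skills skills workflow_registry =
      expand_workflow_skills_alt skills workflow_registry := by
  unfold expand_workflow_skills expand_workflow_skills_alt
  rw [pvTop_eq]

-- ===== VERDICT (by name: the statement is the Claim_ definition above) =====
theorem expand_workflow_skills_spec : Claim_equal_expand_workflow_skills := by
  intro skills reg _ _
  unfold Spec_expand_workflow_skills
  exact pv_ports_eq skills reg
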